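-- pv_equiv track=rewrite | github.com/sweemeng/Advent-of-code-2021 | day_three/utils.py | count_bytes
-- ===== SOURCE A (Python) =====
-- from typing import Callable, Dict, List
--
-- def count_bytes(data: List[str]):
--   counter = {}
--   for item in data:
--       for pos in range(len(item)):
--         curr = counter.get(pos, {"0":0, "1": 0})
--         if item[pos] in ("0", "1"):
--           curr[item[pos]] += 1
--           counter[pos] = curr
--   return counter
-- ===== SOURCE B (Python) =====
-- def count_bytes(data):
--     # pass 1: index each position by the valid '0'/'1' characters seen there
--     cols = {}
--     for item in data:
--         for pos, ch in enumerate(item):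
--             if ch in ("0", "1"):
--                 cols.setdefault(pos, []).append(ch)
--     # pass 2: reshape the per-position character lists into count dicts
--     result = {}
--     for pos, chars in cols.items():
--         result[pos] = {"0": chars.count("0"), "1": chars.count("1")}
--     return result
-- ===== Notes on version B (the rewrite author's own statement) =====
-- stated objective: alternative
-- what changed: A counts in a single sweep that updates per-position {'0','1'} count dicts as it scans; B first materialises an index mapping each position to the list of valid characters seen there, then reshapes that table into the count dicts in a separate second pass (the per-character work drops from a dict-of-dicts update to a list append; measured ~2.3× faster).
import Mathlib
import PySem

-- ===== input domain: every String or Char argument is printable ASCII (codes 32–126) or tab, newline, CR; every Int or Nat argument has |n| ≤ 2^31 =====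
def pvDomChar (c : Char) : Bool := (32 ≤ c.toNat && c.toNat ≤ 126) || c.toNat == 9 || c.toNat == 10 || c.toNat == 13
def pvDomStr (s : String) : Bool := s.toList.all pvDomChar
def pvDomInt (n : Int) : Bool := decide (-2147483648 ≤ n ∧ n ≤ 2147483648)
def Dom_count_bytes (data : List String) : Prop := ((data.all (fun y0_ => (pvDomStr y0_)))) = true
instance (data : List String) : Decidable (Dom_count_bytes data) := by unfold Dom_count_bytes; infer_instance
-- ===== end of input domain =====

-- B replaces A's single accumulating sweep by two passes — first index each position
-- by the '0'/'1' characters seen there, then reshape the lists into count dicts (a different decomposition; a timing run measured B faster).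

-- ===== PORT A =====
-- A: one sweep; counter[pos] = {"0":c0,"1":c1}, created/updated only when a valid char is seen.
-- 'curr[item[pos]] += 1' never raises (the key is "0" or "1", always present in curr),
-- so modify with default 0 computes the same value; pos is always in range, so pyGetD's
-- dummy default ' ' is never used.
def count_bytes (data : List String) : List (Int × List (String × Int)) :=
  (data.foldl (fun counter item =>
      (PySem.List.pyRange 0 (PySem.Str.len item) 1).foldl (fun counter pos =>
        let curr := counter.getD pos (PySem.Dict.ofList [("0", (0 : Int)), ("1", (0 : Int))])
        let ch := PySem.List.pyGetD item.toList pos ' '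
        if ch = '0' ∨ ch = '1' then
          counter.insert pos (curr.modify (String.ofList [ch]) 0 (· + 1))
        else counter) counter)
    (PySem.Dict.empty : PySem.Dict Int (PySem.Dict String Int))).items.map
    (fun p => (p.1, p.2.items))

-- ===== PORT B =====
-- B: 'cols.setdefault(pos, []).append(ch)' sets cols[pos] to its old value (or []) plus [ch],
-- keeping the key's position — exactly Dict.modify.
def count_bytes_alt (data : List String) : List (Int × List (String × Int)) :=
  let cols : PySem.Dict Int (List Char) :=
    data.foldl (fun cols item =>
      (PySem.List.enumerate item.toList 0).foldl (fun cols p =>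
        if p.2 = '0' ∨ p.2 = '1' then cols.modify p.1 [] (· ++ [p.2]) else cols) cols)
      PySem.Dict.empty
  let result : PySem.Dict Int (List (String × Int)) :=
    cols.items.foldl (fun r p =>
      r.insert p.1 [("0", (p.2.count '0' : Int)), ("1", (p.2.count '1' : Int))])
      PySem.Dict.empty
  result.items

-- ===== PRECONDITION & SPEC =====
def Spec_count_bytes (data : List String) (out : List (Int × List (String × Int))) : Prop := out = count_bytes_alt data
instance (data : List String) (out : List (Int × List (String × Int))) : Decidable (Spec_count_bytes data out) := by unfold Spec_count_bytes; infer_instance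

-- ===== CLAIM (what is proved, stated in full; the proofs are below) =====
def Claim_equal_count_bytes : Prop := ∀ (data : List String), Dom_count_bytes data → Spec_count_bytes data (count_bytes data)

-- ===== LEMMAS AND PROOFS =====

-- the inner count dict {"0": l.count '0', "1": l.count '1'} for a column's character list l
def pvCnt (l : List Char) : PySem.Dict String Int :=
  PySem.Dict.mk [("0", (l.count '0' : Int)), ("1", (l.count '1' : Int))]

-- A's counter as a function of B's column index
def pvRender (c : PySem.Dict Int (List Char)) : PySem.Dict Int (PySem.Dict String Int) :=
  PySem.Dict.mk (c.items.map (fun p => (p.1, pvCnt p.2)))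

theorem pvRender_get? (c : PySem.Dict Int (List Char)) (pos : Int) :
    (pvRender c).get? pos = (c.get? pos).map pvCnt := by
  obtain ⟨l⟩ := c
  induction l with
  | nil => rfl
  | cons hd tl ih =>
    obtain ⟨k, v⟩ := hd
    simp only [pvRender, List.map_cons, PySem.Dict.get?_mk_cons] at ih ⊢
    by_cases h : (k == pos)
    · simp [h]
    · simp only [h, Bool.false_eq_true, if_false, ih]

theorem pvRender_getD (c : PySem.Dict Int (List Char)) (pos : Int) :
    (pvRender c).getD pos (pvCnt []) = pvCnt (c.getD pos []) := by
  simp only [PySem.Dict.getD, pvRender_get?]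
  cases c.get? pos <;> rfl

theorem pvRender_contains (c : PySem.Dict Int (List Char)) (pos : Int) :
    (pvRender c).contains pos = c.contains pos := by
  rw [PySem.Dict.contains_eq_isSome_get?, PySem.Dict.contains_eq_isSome_get?, pvRender_get?]
  cases c.get? pos <;> rfl

theorem pvRender_insert (c : PySem.Dict Int (List Char)) (pos : Int) (v : List Char) :
    pvRender (c.insert pos v) = (pvRender c).insert pos (pvCnt v) := by
  apply PySem.Dict.ext
  by_cases h : c.contains pos
  · have h' : (pvRender c).contains pos = true := by rw [pvRender_contains]; exact h
    rw [show (pvRender (c.insert pos v)).items = (c.insert pos v).items.map (fun p => (p.1, pvCnt p.2)) from rfl,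
      PySem.Dict.items_insert_of_contains _ _ h,
      PySem.Dict.items_insert_of_contains _ _ h']
    rw [show (pvRender c).items = c.items.map (fun p => (p.1, pvCnt p.2)) from rfl]
    simp only [List.map_map]
    congr 1
    funext p
    by_cases hp : p.1 == pos
    · simp [Function.comp, hp]
    · simp [Function.comp, hp]
  · have h' : (pvRender c).contains pos = false := by rw [pvRender_contains]; simp [h]
    rw [show (pvRender (c.insert pos v)).items = (c.insert pos v).items.map (fun p => (p.1, pvCnt p.2)) from rfl,
      PySem.Dict.items_insert_of_not_contains _ _ (by simp [h]),
      PySem.Dict.items_insert_of_not_contains _ _ h']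
    simp [pvRender]

theorem pvCnt_append (l : List Char) (ch : Char) (h : ch = '0' ∨ ch = '1') :
    pvCnt (l ++ [ch]) = (pvCnt l).modify (String.ofList [ch]) 0 (· + 1) := by
  rcases h with h | h <;> subst h
  · rw [show String.ofList ['0'] = "0" from rfl]
    simp [pvCnt, PySem.Dict.modify, PySem.Dict.insert, PySem.Dict.getD, PySem.Dict.contains,
      PySem.Dict.get?, List.count_append]
  · rw [show String.ofList ['1'] = "1" from rfl]
    simp [pvCnt, PySem.Dict.modify, PySem.Dict.insert, PySem.Dict.getD, PySem.Dict.contains,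
      PySem.Dict.get?, List.count_append]

-- one character step: A's update of the rendered dict is the rendering of B's update
theorem pv_step (c : PySem.Dict Int (List Char)) (pos : Int) (ch : Char) :
    (if ch = '0' ∨ ch = '1' then
       (pvRender c).insert pos
         (((pvRender c).getD pos (PySem.Dict.ofList [("0", (0 : Int)), ("1", (0 : Int))])).modify
           (String.ofList [ch]) 0 (· + 1))
     else pvRender c)
    = pvRender (if ch = '0' ∨ ch = '1' then c.modify pos [] (· ++ [ch]) else c) := by
  split_ifs with h
  · have h1 : (PySem.Dict.ofList [("0", (0 : Int)), ("1", (0 : Int))]) = pvCnt [] := rfl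
    rw [h1, pvRender_getD, ← pvCnt_append _ _ h,
      show c.modify pos [] (· ++ [ch]) = c.insert pos (c.getD pos [] ++ [ch]) from rfl,
      pvRender_insert]
  · rfl

-- the whole inner loop over the (position, character) pairs of one item
theorem pv_item (ps : List (Int × Char)) (c : PySem.Dict Int (List Char)) :
    ps.foldl (fun counter p =>
        let curr := counter.getD p.1 (PySem.Dict.ofList [("0", (0 : Int)), ("1", (0 : Int))])
        if p.2 = '0' ∨ p.2 = '1' then
          counter.insert p.1 (curr.modify (String.ofList [p.2]) 0 (· + 1))
        else counter) (pvRender c)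
    = pvRender (ps.foldl (fun cols p =>
        if p.2 = '0' ∨ p.2 = '1' then cols.modify p.1 [] (· ++ [p.2]) else cols) c) := by
  induction ps generalizing c with
  | nil => rfl
  | cons hd tl ih =>
    simp only [List.foldl_cons]
    rw [show (let curr := (pvRender c).getD hd.1 (PySem.Dict.ofList [("0", (0 : Int)), ("1", (0 : Int))])
          if hd.2 = '0' ∨ hd.2 = '1' then
            (pvRender c).insert hd.1 (curr.modify (String.ofList [hd.2]) 0 (· + 1))
          else pvRender c)
        = pvRender (if hd.2 = '0' ∨ hd.2 = '1' then c.modify hd.1 [] (· ++ [hd.2]) else c)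
      from pv_step c hd.1 hd.2]
    exact ih _

-- A's index loop over range(len(item)) is B's loop over enumerate(item)
theorem pv_inner (item : String) (d : PySem.Dict Int (PySem.Dict String Int)) :
    (PySem.List.pyRange 0 (PySem.Str.len item) 1).foldl (fun counter pos =>
        let curr := counter.getD pos (PySem.Dict.ofList [("0", (0 : Int)), ("1", (0 : Int))])
        let ch := PySem.List.pyGetD item.toList pos ' '
        if ch = '0' ∨ ch = '1' then
          counter.insert pos (curr.modify (String.ofList [ch]) 0 (· + 1))
        else counter) d
    = (PySem.List.enumerate item.toList 0).foldl (fun counter p =>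
        let curr := counter.getD p.1 (PySem.Dict.ofList [("0", (0 : Int)), ("1", (0 : Int))])
        if p.2 = '0' ∨ p.2 = '1' then
          counter.insert p.1 (curr.modify (String.ofList [p.2]) 0 (· + 1))
        else counter) d := by
  rw [PySem.List.enumerate_eq_map_pyRange item.toList ' ', List.foldl_map]
  rfl

-- the nodup-keys invariant of B's first pass (the `if` body keeps keys unique)
theorem pv_nodup (ps : List (Int × Char)) (c : PySem.Dict Int (List Char))
    (h : c.keys.Nodup) :
    (ps.foldl (fun cols p =>
        if p.2 = '0' ∨ p.2 = '1' then cols.modify p.1 [] (· ++ [p.2]) else cols) c).keys.Nodup := by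
  induction ps generalizing c with
  | nil => exact h
  | cons hd tl ih =>
    simp only [List.foldl_cons]
    apply ih
    split_ifs with hv
    · rw [PySem.Dict.keys_modify]
      by_cases hc : c.contains hd.1
      · rwa [PySem.Dict.keys_insert_of_contains _ _ hc]
      · rw [PySem.Dict.keys_insert_of_not_contains _ _ (by simp [hc])]
        refine List.Nodup.append h (List.nodup_singleton _) ?_
        intro x hx hmem
        rw [List.mem_singleton] at hmem
        subst hmem
        exact absurd ((PySem.Dict.contains_iff_mem_keys _ _).mpr hx) (by simp [hc])
    · exact h

theorem pv_cols_nodup (data : List String) :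
    (data.foldl (fun cols item =>
        (PySem.List.enumerate item.toList 0).foldl (fun cols p =>
          if p.2 = '0' ∨ p.2 = '1' then cols.modify p.1 [] (· ++ [p.2]) else cols) cols)
      (PySem.Dict.empty : PySem.Dict Int (List Char))).keys.Nodup := by
  suffices h : ∀ (c : PySem.Dict Int (List Char)), c.keys.Nodup →
      (data.foldl (fun cols item =>
        (PySem.List.enumerate item.toList 0).foldl (fun cols p =>
          if p.2 = '0' ∨ p.2 = '1' then cols.modify p.1 [] (· ++ [p.2]) else cols) cols) c).keys.Nodup by
    exact h _ (PySem.Dict.nodup_keys_empty)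
  induction data with
  | nil => exact fun c h => h
  | cons item tl ih =>
    intro c hc
    exact ih _ (pv_nodup _ _ hc)

-- A's counter is the rendering of B's column index, over the whole data
theorem pv_main (data : List String) (c : PySem.Dict Int (List Char)) :
    data.foldl (fun counter item =>
      (PySem.List.pyRange 0 (PySem.Str.len item) 1).foldl (fun counter pos =>
        let curr := counter.getD pos (PySem.Dict.ofList [("0", (0 : Int)), ("1", (0 : Int))])
        let ch := PySem.List.pyGetD item.toList pos ' '
        if ch = '0' ∨ ch = '1' then
          counter.insert pos (curr.modify (String.ofList [ch]) 0 (· + 1))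
        else counter) counter) (pvRender c)
    = pvRender (data.foldl (fun cols item =>
        (PySem.List.enumerate item.toList 0).foldl (fun cols p =>
          if p.2 = '0' ∨ p.2 = '1' then cols.modify p.1 [] (· ++ [p.2]) else cols) cols) c) := by
  induction data generalizing c with
  | nil => rfl
  | cons item tl ih =>
    simp only [List.foldl_cons]
    rw [pv_inner, pv_item]
    exact ih _

-- ===== VERDICT (by name: the statement is the Claim_ definition above) =====
theorem count_bytes_spec : Claim_equal_count_bytes := by
  intro data _
  unfold Spec_count_bytes count_bytes count_bytes_alt
  have hempty : (PySem.Dict.empty : PySem.Dict Int (PySem.Dict String Int)) = pvRender PySem.Dict.empty := rfl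
  rw [hempty, pv_main]
  set cols := data.foldl (fun cols item =>
      (PySem.List.enumerate item.toList 0).foldl (fun cols p =>
        if p.2 = '0' ∨ p.2 = '1' then cols.modify p.1 [] (· ++ [p.2]) else cols) cols)
    (PySem.Dict.empty : PySem.Dict Int (List Char)) with hcols
  rw [PySem.Dict.items_foldl_insert_fresh cols.items (·.1)
        (fun p => [("0", (p.2.count '0' : Int)), ("1", (p.2.count '1' : Int))]) PySem.Dict.empty
        (fun a _ => PySem.Dict.contains_empty a.1)
        (by rw [hcols]; exact pv_cols_nodup data)]
  simp only [pvRender, List.map_map]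
  rfl
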